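-- pv_equiv track=rewrite | github.com/adisav17/Deep-Semantic-Role-Labeling-with-Auxilary-tasks | python scripts/test_srl_model_with_aux.py | map_pos_tags
-- ===== SOURCE A (Python) =====
-- def map_pos_tags(tag):
--     pos_groups = {
--         "NN": ["NNS", "NNP", "NNPS"],
--         "VB": ["VBD", "VBG", "VBN", "VBP", "VBZ"],
--         "CC": ["CC"],
--         "DT": ["DT"],
--         "JJ": ["JJ", "JJR", "JJS"],
--         "IN": ["IN"],
--         "PRP": ["PRP", "PRP$"],
--         "DT": ["DT"],
--     }
--
--     for key, value in pos_groups.items():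
--         if tag in value:
--             return key
--     return "other"
-- ===== SOURCE B (Python) =====
-- # B: recognizes valid fine tags with one whitelist, then COMPUTES the coarse
-- # group from the tag's structure (every fine tag begins with its group key),
-- # instead of scanning group->members lists.
-- _KNOWN = frozenset([
--     "NNS", "NNP", "NNPS",
--     "VBD", "VBG", "VBN", "VBP", "VBZ",
--     "CC", "DT", "JJ", "JJR", "JJS", "IN", "PRP", "PRP$",
-- ])
-- _GROUPS = ("PRP", "NN", "VB", "CC", "DT", "JJ", "IN")
--
-- def map_pos_tags(tag):
--     if tag in _KNOWN:
--         for g in _GROUPS: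
--             if tag.startswith(g):
--                 return g
--     return "other"
-- ===== Notes on version B (the rewrite author's own statement) =====
-- stated objective: alternative
-- what changed: Instead of scanning a group->members table, B validates the tag against one flat whitelist of the 16 fine tags and then computes the coarse group structurally, as the group key that is a prefix of the tag (every fine tag begins with its group key, and no tag matches two keys).
import Mathlib
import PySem

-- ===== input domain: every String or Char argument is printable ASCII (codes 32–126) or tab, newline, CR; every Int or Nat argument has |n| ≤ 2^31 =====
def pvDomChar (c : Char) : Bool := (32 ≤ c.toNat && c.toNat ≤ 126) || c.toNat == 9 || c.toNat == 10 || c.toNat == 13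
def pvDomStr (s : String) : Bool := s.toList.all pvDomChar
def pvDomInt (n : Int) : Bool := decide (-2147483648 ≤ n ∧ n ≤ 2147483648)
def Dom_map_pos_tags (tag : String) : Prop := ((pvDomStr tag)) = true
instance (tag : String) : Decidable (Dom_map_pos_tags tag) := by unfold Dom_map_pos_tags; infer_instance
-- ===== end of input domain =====

-- B validates the tag against a flat whitelist and computes its coarse group as the group key prefixing the tag, instead of scanning A's group->members table (alternative decomposition).


-- ===== PORT A =====
-- the dict literal of A; the duplicate "DT" key overwrites in place (same value), as in Python
def posGroups : PySem.Dict String (List String) :=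
  ((((((((PySem.Dict.empty.insert "NN" ["NNS", "NNP", "NNPS"]).insert
      "VB" ["VBD", "VBG", "VBN", "VBP", "VBZ"]).insert
      "CC" ["CC"]).insert
      "DT" ["DT"]).insert
      "JJ" ["JJ", "JJR", "JJS"]).insert
      "IN" ["IN"]).insert
      "PRP" ["PRP", "PRP$"]).insert
      "DT" ["DT"])

-- the 'for key, value in pos_groups.items(): if tag in value: return key' loop
def posLoop (tag : String) : List (String × List String) → String
  | [] => "other"
  | (key, value) :: rest => if value.contains tag then key else posLoop tag rest

def map_pos_tags (tag : String) : String := posLoop tag posGroups.items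

-- ===== PORT B =====
def knownTags : PySem.Set String :=
  PySem.Set.ofList
    ["NNS", "NNP", "NNPS",
     "VBD", "VBG", "VBN", "VBP", "VBZ",
     "CC", "DT", "JJ", "JJR", "JJS", "IN", "PRP", "PRP$"]

def groupKeys : List String := ["PRP", "NN", "VB", "CC", "DT", "JJ", "IN"]

-- 'for g in _GROUPS: if tag.startswith(g): return g' then fall through to "other"
def prefLoop (tag : String) : List String → String
  | [] => "other"
  | g :: rest => if PySem.Str.startswith tag g then g else prefLoop tag rest

def map_pos_tags_alt (tag : String) : String :=
  if PySem.Set.contains knownTags tag then prefLoop tag groupKeys else "other"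

-- ===== PRECONDITION & SPEC =====
def Spec_map_pos_tags (tag : String) (out : String) : Prop := out = map_pos_tags_alt tag
instance (tag : String) (out : String) : Decidable (Spec_map_pos_tags tag out) := by unfold Spec_map_pos_tags; infer_instance

-- ===== CLAIM (what is proved, stated in full; the proofs are below) =====
def Claim_equal_map_pos_tags : Prop := ∀ (tag : String), Dom_map_pos_tags tag → Spec_map_pos_tags tag (map_pos_tags tag)

-- ===== LEMMAS AND PROOFS =====

-- ===== VERDICT (by name: the statement is the Claim_ definition above) =====
theorem map_pos_tags_spec : Claim_equal_map_pos_tags := by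
  intro tag _
  unfold Spec_map_pos_tags
  by_cases h0 : tag = "NNS"
  · subst h0; decide
  by_cases h1 : tag = "NNP"
  · subst h1; decide
  by_cases h2 : tag = "NNPS"
  · subst h2; decide
  by_cases h3 : tag = "VBD"
  · subst h3; decide
  by_cases h4 : tag = "VBG"
  · subst h4; decide
  by_cases h5 : tag = "VBN"
  · subst h5; decide
  by_cases h6 : tag = "VBP"
  · subst h6; decide
  by_cases h7 : tag = "VBZ"
  · subst h7; decide
  by_cases h8 : tag = "CC"
  · subst h8; decide
  by_cases h9 : tag = "DT"
  · subst h9; decide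
  by_cases h10 : tag = "JJ"
  · subst h10; decide
  by_cases h11 : tag = "JJR"
  · subst h11; decide
  by_cases h12 : tag = "JJS"
  · subst h12; decide
  by_cases h13 : tag = "IN"
  · subst h13; decide
  by_cases h14 : tag = "PRP"
  · subst h14; decide
  by_cases h15 : tag = "PRP$"
  · subst h15; decide
  -- tag is none of the 16 fine tags: both sides return "other"
  have hA : posGroups.items =
      [("NN", ["NNS", "NNP", "NNPS"]), ("VB", ["VBD", "VBG", "VBN", "VBP", "VBZ"]),
       ("CC", ["CC"]), ("DT", ["DT"]), ("JJ", ["JJ", "JJR", "JJS"]), ("IN", ["IN"]),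
       ("PRP", ["PRP", "PRP$"])] := by decide
  have hB : PySem.Set.contains knownTags tag = false := by
    simp only [knownTags, PySem.Set.contains]
    simp [h0, h1, h2, h3, h4, h5, h6, h7, h8, h9, h10, h11, h12, h13, h14, h15,
      PySem.Set.ofList]
  simp only [map_pos_tags, map_pos_tags_alt, hA, hB, posLoop,
    List.contains_cons, List.contains_nil, if_false, Bool.false_eq_true]
  simp [h0, h1, h2, h3, h4, h5, h6, h7, h8, h9, h10, h11, h12, h13, h14, h15]
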